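-- pv_equiv track=rewrite | github.com/hyuns66/Algorithm | data_structure/HyeonSeok/BOJ_3986.py | check
-- ===== SOURCE A (Python) =====
-- def check(sequence):
--     stack = list()
--     stack.append(sequence[0])
--     for i in range(1, len(sequence)):
--         if not stack or stack[-1] != sequence[i]:
--             stack.append(sequence[i])
--         else:
--             stack.pop()
--     if stack:
--         return 0
--     else:
--         return 1
-- ===== SOURCE B (Python) =====
-- def check(sequence):
--     seq = list(sequence)
--     while True:
--         for i in range(len(seq) - 1):
--             if seq[i] == seq[i + 1]:
--                 seq = seq[:i] + seq[i + 2:]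
--                 break
--         else:
--             break
--     return 1 if not seq else 0
-- ===== Notes on version B (the rewrite author's own statement) =====
-- stated objective: alternative
-- what changed: B replaces the one-pass stack with a repeated-reduction rewriting loop: it repeatedly removes the first adjacent equal pair until the sequence is irreducible, then tests emptiness; by confluence of the xx->eps rule the outcome matches the stack's.
import Mathlib
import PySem

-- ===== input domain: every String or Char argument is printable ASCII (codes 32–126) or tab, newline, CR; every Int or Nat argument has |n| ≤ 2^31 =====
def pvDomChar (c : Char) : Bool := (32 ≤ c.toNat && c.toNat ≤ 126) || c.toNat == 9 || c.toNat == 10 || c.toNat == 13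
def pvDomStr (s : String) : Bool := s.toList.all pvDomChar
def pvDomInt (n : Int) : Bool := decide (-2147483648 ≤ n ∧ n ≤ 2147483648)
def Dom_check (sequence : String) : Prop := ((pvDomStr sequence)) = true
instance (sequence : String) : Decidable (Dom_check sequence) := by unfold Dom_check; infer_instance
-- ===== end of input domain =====

-- B replaces the one-pass stack with a repeated remove-first-adjacent-equal-pair rewriting loop
-- (alternative decomposition; not faster). A raises IndexError on "", excluded by Pre_check.

-- ===== PORT A =====
-- Python's stack (append/pop at the end, stack[-1] the top) is modelled head-first:
-- push = cons, pop = tail, stack[-1] = head? — an exact step-for-step rendering of A's loop body.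
def stepA (st : List Char) (x : Char) : List Char :=
  if st = [] ∨ st.head? ≠ some x then x :: st else st.tail

def check (sequence : String) : Int :=
  match sequence.toList with
  | [] => 0   -- Python raises IndexError at sequence[0]; excluded by Pre_check
  | c :: rest =>
    let stack := rest.foldl stepA [c]   -- stack = [sequence[0]], then the for-loop over sequence[1:]
    if stack = [] then 1 else 0

-- ===== PORT B =====
-- remove the FIRST adjacent equal pair, if any (Source B's inner for-loop with break/slice)
def reduceOnce : List Char → Option (List Char)
  | [] => none
  | [_] => none
  | a :: b :: rest => if a = b then some rest else (reduceOnce (b :: rest)).map (a :: ·)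

theorem reduceOnce_length : ∀ (l l' : List Char), reduceOnce l = some l' → l'.length < l.length := by
  intro l
  induction l with
  | nil => intro l' h; simp [reduceOnce] at h
  | cons a t ih =>
    intro l' h
    cases t with
    | nil => simp [reduceOnce] at h
    | cons b rest =>
      by_cases hab : a = b
      · rw [reduceOnce, if_pos hab, Option.some_inj] at h
        subst h
        simp only [List.length_cons]
        omega
      · rw [reduceOnce, if_neg hab] at h
        simp only [Option.map_eq_some_iff] at h
        obtain ⟨m, hm, rfl⟩ := h
        have := ih m hm
        simp only [List.length_cons] at this ⊢
        omega

-- Source B's outer while-loop: keep removing until irreducible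
def reduceFull (l : List Char) : List Char :=
  match h : reduceOnce l with
  | some l' => reduceFull l'
  | none => l
termination_by l.length
decreasing_by exact reduceOnce_length _ _ h

def check_alt (sequence : String) : Int :=
  if reduceFull sequence.toList = [] then 1 else 0

-- ===== PRECONDITION & SPEC =====
-- Pre_check excludes only the empty string, on which A raises IndexError.
def Pre_check (sequence : String) : Prop := sequence ≠ ""
instance (sequence : String) : Decidable (Pre_check sequence) := by unfold Pre_check; infer_instance
def pvWitness_check : String := "abba"

def Spec_check (sequence : String) (out : Int) : Prop := out = check_alt sequence
instance (sequence : String) (out : Int) : Decidable (Spec_check sequence out) := by unfold Spec_check; infer_instance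

-- ===== CLAIM (what is proved, stated in full; the proofs are below) =====
def Claim_equal_check : Prop := ∀ (sequence : String), Dom_check sequence → Pre_check sequence → Spec_check sequence (check sequence)

-- ===== LEMMAS AND PROOFS =====

-- A's stack never holds two equal adjacent elements
theorem stepA_chain {st : List Char} (h : st.IsChain (· ≠ ·)) (x : Char) :
    (stepA st x).IsChain (· ≠ ·) := by
  unfold stepA
  split
  · rename_i hc
    cases st with
    | nil => simp
    | cons b t =>
      have hbx : b ≠ x := by
        rcases hc with hc | hc
        · exact absurd hc (by simp)
        · intro he; exact hc (by simp [he])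
      exact List.isChain_cons_cons.mpr ⟨fun he => hbx he.symm, h⟩
  · exact h.tail

-- processing x twice on a chain stack is the identity
theorem stepA_stepA {st : List Char} (h : st.IsChain (· ≠ ·)) (x : Char) :
    stepA (stepA st x) x = st := by
  cases st with
  | nil => simp [stepA]
  | cons b t =>
    by_cases hbx : b = x
    · subst hbx
      have h1 : stepA (b :: t) b = t := by simp [stepA]
      rw [h1]
      cases t with
      | nil => simp [stepA]
      | cons c u =>
        have hbc : b ≠ c := (List.isChain_cons_cons.mp h).1
        by_cases hcbeq : c = b
        · exact absurd hcbeq.symm hbc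
        · simp [stepA, hcbeq]
    · have h1 : stepA (b :: t) x = x :: b :: t := by simp [stepA, hbx]
      rw [h1]; simp [stepA]

-- one removal of an adjacent equal pair does not change A's fold
theorem foldl_reduceOnce : ∀ (l l' : List Char), reduceOnce l = some l' →
    ∀ (st : List Char), st.IsChain (· ≠ ·) → l.foldl stepA st = l'.foldl stepA st := by
  intro l
  induction l with
  | nil => intro l' h; simp [reduceOnce] at h
  | cons a t ih =>
    intro l' h st hst
    cases t with
    | nil => simp [reduceOnce] at h
    | cons b rest =>
      by_cases hab : a = b
      · subst hab
        have h' : rest = l' := by simpa [reduceOnce] using h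
        subst h'
        calc List.foldl stepA st (a :: a :: rest)
            = List.foldl stepA (stepA (stepA st a) a) rest := rfl
          _ = List.foldl stepA st rest := by rw [stepA_stepA hst]
      · simp only [reduceOnce, if_neg hab, Option.map_eq_some_iff] at h
        obtain ⟨m, hm, rfl⟩ := h
        calc List.foldl stepA st (a :: b :: rest)
            = List.foldl stepA (stepA st a) (b :: rest) := rfl
          _ = List.foldl stepA (stepA st a) m := ih m hm _ (stepA_chain hst a)
          _ = List.foldl stepA st (a :: m) := rfl

-- iterating: A's fold is invariant under full reduction
theorem foldl_reduceFull (l : List Char) : l.foldl stepA [] = (reduceFull l).foldl stepA [] := by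
  rw [reduceFull]
  split
  · rename_i l' h
    rw [foldl_reduceOnce l l' h [] (by simp)]
    exact foldl_reduceFull l'
  · rfl
termination_by l.length
decreasing_by exact reduceOnce_length _ _ (by assumption)

-- an irreducible list is a chain (no adjacent equal pair)
theorem reduceOnce_none_chain : ∀ (l : List Char), reduceOnce l = none → l.IsChain (· ≠ ·) := by
  intro l
  induction l with
  | nil => intro _; simp
  | cons a t ih =>
    intro h
    cases t with
    | nil => simp
    | cons b rest =>
      by_cases hab : a = b
      · rw [reduceOnce, if_pos hab] at h; simp at h
      · rw [reduceOnce, if_neg hab] at h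
        simp only [Option.map_eq_none_iff] at h
        exact List.isChain_cons_cons.mpr ⟨hab, ih h⟩

-- A's fold on a chain just pushes everything (never pops)
theorem foldl_stepA_of_chain : ∀ (l : List Char), l.IsChain (· ≠ ·) →
    ∀ (st : List Char), (∀ a, l.head? = some a → st.head? ≠ some a) →
    l.foldl stepA st = l.reverse ++ st := by
  intro l
  induction l with
  | nil => intro _ st _; simp
  | cons a t ih =>
    intro hc st hh
    have hpush : stepA st a = a :: st := by
      have := hh a rfl
      unfold stepA
      split
      · rfl
      · rename_i hcond
        push_neg at hcond
        exact absurd hcond.2 this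
    rw [List.foldl_cons, hpush]
    have hh' : ∀ b, t.head? = some b → (a :: st : List Char).head? ≠ some b := by
      intro b hb hab
      cases t with
      | nil => simp at hb
      | cons c u =>
        have hac : a ≠ c := (List.isChain_cons_cons.mp hc).1
        simp at hab hb
        exact hac (hab.trans hb.symm)
    rw [ih hc.tail (a :: st) hh']
    simp

theorem reduceFull_irreducible (l : List Char) : reduceOnce (reduceFull l) = none := by
  rw [reduceFull]
  split
  · exact reduceFull_irreducible _
  · assumption
termination_by l.length
decreasing_by exact reduceOnce_length _ _ (by assumption)

-- the emptiness test agrees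
theorem foldl_empty_iff (l : List Char) : (l.foldl stepA [] = []) ↔ (reduceFull l = []) := by
  rw [foldl_reduceFull l]
  constructor
  · intro h
    by_contra hne
    have hc := reduceOnce_none_chain _ (reduceFull_irreducible l)
    rw [foldl_stepA_of_chain (reduceFull l) hc [] (by intro a _; simp)] at h
    simp at h
    exact hne h
  · intro h; rw [h]; rfl

-- ===== VERDICT (by name: the statement is the Claim_ definition above) =====
theorem check_spec : Claim_equal_check := by
  intro sequence _ hpre
  unfold Spec_check check check_alt
  cases hl : sequence.toList with
  | nil =>
    exact absurd (by rw [← sequence.toList_inj, hl]; rfl) hpre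
  | cons c rest =>
    simp only
    have hstart : stepA [] c = [c] := by simp [stepA]
    have hfold : rest.foldl stepA [c] = (c :: rest).foldl stepA [] := by
      rw [List.foldl_cons, hstart]
    rw [hfold, ← hl]
    by_cases h : sequence.toList.foldl stepA [] = []
    · rw [if_pos h, if_pos ((foldl_empty_iff _).mp h)]
    · rw [if_neg h, if_neg (fun hr => h ((foldl_empty_iff _).mpr hr))]
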